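-- pv_equiv track=rewrite | github.com/rtsoliday/medm | tests/testADL_SaveFiles.py | strip_empty_polyline_blocks
-- ===== SOURCE A (Python) =====
-- def _is_empty_polyline(block_lines: list[str]) -> bool:
--   """Return True if block has a points section with no coordinates."""
--   inside_points = False
--   saw_points = False
--   points_depth = 0
--   for line in block_lines:
--     stripped = line.strip()
--     if not inside_points and stripped.startswith("points"):
--       inside_points = True
--       saw_points = True
--       points_depth = line.count("{") - line.count("}")
--       if "(" in line:
--         return False
--       continue
--
--     if inside_points:
--       if "(" in line:
--         return False
--       points_depth += line.count("{") - line.count("}")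
--       if points_depth <= 0:
--         inside_points = False
--         break
--
--   return saw_points and not inside_points
--
-- def strip_empty_polyline_blocks(lines: list[str]) -> list[str]:
--   """Remove polyline blocks that define no points."""
--   result: list[str] = []
--   i = 0
--   while i < len(lines):
--     line = lines[i]
--     stripped = line.strip()
--     if stripped.startswith("polyline"):
--       block: list[str] = []
--       depth = 0
--       while i < len(lines):
--         block_line = lines[i]
--         block.append(block_line)
--         depth += block_line.count("{") - block_line.count("}")
--         i += 1
--         if depth <= 0:
--           break
--       if _is_empty_polyline(block):
--         continue
--       result.extend(block)
--       continue
--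
--     result.append(line)
--     i += 1
--
--   return result
-- ===== SOURCE B (Python) =====
-- def strip_empty_polyline_blocks(lines: list[str]) -> list[str]:
--   """Remove polyline blocks that define no points (single-pass state machine)."""
--   result: list[str] = []
--   in_block = False
--   out: list[str] = []
--   depth = 0
--   phase = 0        # 0 = no points section seen, 1 = inside points, 2 = points section closed
--   pdepth = 0
--   bad = False      # a "(" was seen inside the points section -> block has coordinates
--   for line in lines:
--     if not in_block:
--       if not line.strip().startswith("polyline"):
--         result.append(line)
--         continue
--       in_block = True
--       out = []
--       depth = 0
--       phase = 0
--       pdepth = 0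
--       bad = False
--     out.append(line)
--     opens = line.count("{")
--     closes = line.count("}")
--     depth += opens - closes
--     if not bad:
--       if phase == 0:
--         if line.strip().startswith("points"):
--           phase = 1
--           pdepth = opens - closes
--           if "(" in line:
--             bad = True
--       elif phase == 1:
--         if "(" in line:
--           bad = True
--         else:
--           pdepth += opens - closes
--           if pdepth <= 0:
--             phase = 2
--     if depth <= 0:
--       in_block = False
--       if not (phase == 2 and not bad):
--         result.extend(out)
--   if in_block and not (phase == 2 and not bad):
--     result.extend(out)
--   return result
-- ===== Notes on version B (the rewrite author's own statement) =====
-- stated objective: alternative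
-- what changed: Replaced A's nested while-loop that first extracts each polyline block and then rescans it with _is_empty_polyline by a single one-pass state machine over the lines that tracks brace depth and the points-section emptiness simultaneously, removing the per-block rescan.
import Mathlib
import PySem

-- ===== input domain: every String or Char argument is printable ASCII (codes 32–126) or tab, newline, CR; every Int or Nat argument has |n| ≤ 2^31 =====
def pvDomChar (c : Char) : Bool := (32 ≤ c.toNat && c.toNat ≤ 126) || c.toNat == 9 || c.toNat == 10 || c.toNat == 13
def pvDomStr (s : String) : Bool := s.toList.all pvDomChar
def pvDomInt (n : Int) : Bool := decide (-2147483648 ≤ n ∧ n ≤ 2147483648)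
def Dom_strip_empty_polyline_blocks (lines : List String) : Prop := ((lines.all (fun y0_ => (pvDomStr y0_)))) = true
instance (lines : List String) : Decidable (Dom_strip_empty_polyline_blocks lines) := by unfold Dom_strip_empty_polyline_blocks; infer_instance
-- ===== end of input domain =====

-- B replaces A's two-pass scheme (extract each polyline block, then rescan it with
-- _is_empty_polyline) by one single-pass state machine over the lines; same O(n) cost.

-- ===== PORT A =====

-- inner `while` of A: consume lines, accumulating brace depth, until depth <= 0 or input ends;
-- returns (block, remaining lines)
def takeBlock : List String → Int → (List String × List String)
  | [], _ => ([], [])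
  | l :: ls, depth =>
      let depth' := depth + (PySem.Str.count l "{" : Int) - (PySem.Str.count l "}" : Int)
      if depth' ≤ 0 then ([l], ls)
      else
        let p := takeBlock ls depth'
        (l :: p.1, p.2)

-- port of _is_empty_polyline's for-loop (early `return False` and `break` become results)
def isEmptyPolyline : List String → Bool → Bool → Int → Bool
  | [], inside, saw, _ => saw && !inside
  | l :: ls, inside, saw, pd =>
      let stripped := PySem.Str.strip l
      if !inside && PySem.Str.startswith stripped "points" then
        let pd' := (PySem.Str.count l "{" : Int) - (PySem.Str.count l "}" : Int)
        if PySem.Str.isIn "(" l then false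
        else isEmptyPolyline ls true true pd'
      else if inside then
        if PySem.Str.isIn "(" l then false
        else
          let pd' := pd + (PySem.Str.count l "{" : Int) - (PySem.Str.count l "}" : Int)
          if pd' ≤ 0 then saw  -- break with inside_points = False; final `return saw and not inside_points`
          else isEmptyPolyline ls inside saw pd'
      else isEmptyPolyline ls inside saw pd

-- termination of A's outer loop: the inner loop consumed at least one line
theorem takeBlock_rest_le : ∀ (xs : List String) (d : Int), (takeBlock xs d).2.length ≤ xs.length := by
  intro xs
  induction xs with
  | nil => intro d; simp [takeBlock]
  | cons l ls ih =>
      intro d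
      simp only [takeBlock]
      split
      · simp
      · simpa using Nat.le_succ_of_le (ih _)

theorem takeBlock_rest_lt (l : String) (ls : List String) (d : Int) :
    (takeBlock (l :: ls) d).2.length < (l :: ls).length := by
  have h := takeBlock_rest_le ls (d + (PySem.Str.count l "{" : Int) - (PySem.Str.count l "}" : Int))
  simp only [takeBlock]
  split
  · simp
  · simpa using Nat.lt_succ_of_le h

def strip_empty_polyline_blocks (lines : List String) : List String :=
  match lines with
  | [] => []
  | l :: ls =>
      if PySem.Str.startswith (PySem.Str.strip l) "polyline" then
        let p := takeBlock (l :: ls) 0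
        if isEmptyPolyline p.1 false false 0 then strip_empty_polyline_blocks p.2
        else p.1 ++ strip_empty_polyline_blocks p.2
      else l :: strip_empty_polyline_blocks ls
  termination_by lines.length
  decreasing_by
  · exact takeBlock_rest_lt l ls 0
  · exact takeBlock_rest_lt l ls 0
  · simp

-- ===== PORT B =====

structure BState where
  res : List String
  inb : Bool
  out : List String
  depth : Int
  ph : Int
  pd : Int
  bad : Bool
deriving Repr, DecidableEq

-- the `if not bad:` points-tracking region of B's loop body, on state (phase, pdepth, bad)
def pstep (s : Int × Int × Bool) (line : String) : Int × Int × Bool :=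
  if s.2.2 then s
  else if s.1 == 0 then
    if PySem.Str.startswith (PySem.Str.strip line) "points" then
      (1, (PySem.Str.count line "{" : Int) - (PySem.Str.count line "}" : Int),
       PySem.Str.isIn "(" line)
    else s
  else if s.1 == 1 then
    if PySem.Str.isIn "(" line then (s.1, s.2.1, true)
    else
      let pd' := s.2.1 + (PySem.Str.count line "{" : Int) - (PySem.Str.count line "}" : Int)
      if pd' ≤ 0 then (2, pd', s.2.2) else (s.1, pd', s.2.2)
  else s

-- `phase == 2 and not bad`: the buffered block is an empty polyline
def emptyPts (ph : Int) (bad : Bool) : Bool := ph == 2 && !bad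

-- one iteration of B's for-loop
def bstep (st : BState) (line : String) : BState :=
  if st.inb = false ∧ PySem.Str.startswith (PySem.Str.strip line) "polyline" = false then
    { st with res := st.res ++ [line] }
  else
    let st1 := if st.inb then st
               else { st with inb := true, out := [], depth := 0, ph := 0, pd := 0, bad := false }
    let p := pstep (st1.ph, st1.pd, st1.bad) line
    let depth' := st1.depth + (PySem.Str.count line "{" : Int) - (PySem.Str.count line "}" : Int)
    let st2 : BState := ⟨st1.res, true, st1.out ++ [line], depth', p.1, p.2.1, p.2.2⟩
    if depth' ≤ 0 then
      { st2 with inb := false,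
                 res := if emptyPts st2.ph st2.bad then st2.res else st2.res ++ st2.out }
    else st2

-- B's final flush of a still-open block
def bfinish (st : BState) : List String :=
  if st.inb && !(emptyPts st.ph st.bad) then st.res ++ st.out else st.res

def strip_empty_polyline_blocks_alt (lines : List String) : List String :=
  bfinish (lines.foldl bstep ⟨[], false, [], 0, 0, 0, false⟩)

-- ===== PRECONDITION & SPEC =====
def Spec_strip_empty_polyline_blocks (lines : List String) (out : List String) : Prop := out = strip_empty_polyline_blocks_alt lines
instance (lines : List String) (out : List String) : Decidable (Spec_strip_empty_polyline_blocks lines out) := by unfold Spec_strip_empty_polyline_blocks; infer_instance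

-- ===== CLAIM (what is proved, stated in full; the proofs are below) =====
def Claim_equal_strip_empty_polyline_blocks : Prop := ∀ (lines : List String), Dom_strip_empty_polyline_blocks lines → Spec_strip_empty_polyline_blocks lines (strip_empty_polyline_blocks lines)

-- ===== LEMMAS AND PROOFS =====

theorem pfold_bad : ∀ (ls : List String) (ph pd : Int),
    ls.foldl pstep (ph, pd, true) = (ph, pd, true) := by
  intro ls
  induction ls with
  | nil => intro ph pd; rfl
  | cons l ls ih => intro ph pd; simp [pstep, ih]

theorem pfold_two : ∀ (ls : List String) (pd : Int),
    ls.foldl pstep (2, pd, false) = (2, pd, false) := by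
  intro ls
  induction ls with
  | nil => intro pd; rfl
  | cons l ls ih => intro pd; simp [pstep, ih]

-- A's _is_empty_polyline equals B's incremental points-state, from both reachable shapes
theorem isEmpty_eq : ∀ (ls : List String) (pd : Int),
    (isEmptyPolyline ls false false pd
       = emptyPts (ls.foldl pstep (0, pd, false)).1 (ls.foldl pstep (0, pd, false)).2.2) ∧
    (isEmptyPolyline ls true true pd
       = emptyPts (ls.foldl pstep (1, pd, false)).1 (ls.foldl pstep (1, pd, false)).2.2) := by
  intro ls
  induction ls with
  | nil => intro pd; constructor <;> rfl
  | cons l ls ih =>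
      intro pd
      have ih1 := fun pd => (ih pd).1
      have ih2 := fun pd => (ih pd).2
      constructor
      · by_cases hpts : PySem.Str.startswith (PySem.Str.strip l) "points" = true
        · by_cases hpar : PySem.Str.isIn "(" l = true
          all_goals simp only [List.foldl_cons, pstep, isEmptyPolyline, hpts, hpar]
          · simp at hpts hpar ⊢; simp [pfold_bad, emptyPts]
          · simp at hpts hpar ⊢; simp [ih2]
        · simp only [List.foldl_cons, pstep, isEmptyPolyline]
          simp at hpts ⊢; simp [hpts, ih1]
      · by_cases hpar : PySem.Str.isIn "(" l = true
        all_goals simp only [List.foldl_cons, pstep, isEmptyPolyline]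
        · simp at hpar ⊢; simp [hpar, pfold_bad, emptyPts]
        · by_cases hd : pd + (PySem.Str.count l "{" : Int) - (PySem.Str.count l "}" : Int) ≤ 0
          · simp at hpar hd ⊢; simp [hpar, hd, pfold_two, emptyPts]
          · simp at hpar hd ⊢
            simp [hpar, not_le.mpr hd, ih2, emptyPts]

-- continuing B from any not-in-block state: the stale block fields are irrelevant
def contB (res : List String) (r : List String) : List String :=
  bfinish (r.foldl bstep ⟨res, false, [], 0, 0, 0, false⟩)

-- the three shapes of one B step
theorem bstep_pass (res o : List String) (d p q : Int) (b : Bool) (l : String)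
    (hp : PySem.Str.startswith (PySem.Str.strip l) "polyline" = false) :
    bstep ⟨res, false, o, d, p, q, b⟩ l = ⟨res ++ [l], false, o, d, p, q, b⟩ := by
  simp at hp; simp [bstep, hp]

theorem bstep_start (res o : List String) (d p q : Int) (b : Bool) (l : String)
    (hp : PySem.Str.startswith (PySem.Str.strip l) "polyline" = true) :
    bstep ⟨res, false, o, d, p, q, b⟩ l = bstep ⟨res, true, [], 0, 0, 0, false⟩ l := by
  simp at hp; simp [bstep, hp]

theorem bstep_inblock (res out : List String) (d ph pd : Int) (bad : Bool) (l : String) :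
    bstep ⟨res, true, out, d, ph, pd, bad⟩ l =
      if d + (PySem.Str.count l "{" : Int) - (PySem.Str.count l "}" : Int) ≤ 0 then
        ⟨(if emptyPts (pstep (ph, pd, bad) l).1 (pstep (ph, pd, bad) l).2.2 then res
          else res ++ (out ++ [l])), false, out ++ [l],
         d + (PySem.Str.count l "{" : Int) - (PySem.Str.count l "}" : Int),
         (pstep (ph, pd, bad) l).1, (pstep (ph, pd, bad) l).2.1, (pstep (ph, pd, bad) l).2.2⟩
      else
        ⟨res, true, out ++ [l],
         d + (PySem.Str.count l "{" : Int) - (PySem.Str.count l "}" : Int),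
         (pstep (ph, pd, bad) l).1, (pstep (ph, pd, bad) l).2.1, (pstep (ph, pd, bad) l).2.2⟩ := by
  simp [bstep]

theorem bfold_junk : ∀ (ls : List String) (res : List String)
    (o1 : List String) (d1 p1 q1 : Int) (b1 : Bool)
    (o2 : List String) (d2 p2 q2 : Int) (b2 : Bool),
    bfinish (ls.foldl bstep ⟨res, false, o1, d1, p1, q1, b1⟩)
      = bfinish (ls.foldl bstep ⟨res, false, o2, d2, p2, q2, b2⟩) := by
  intro ls
  induction ls with
  | nil => intros; rfl
  | cons l ls ih =>
      intro res o1 d1 p1 q1 b1 o2 d2 p2 q2 b2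
      cases hp : PySem.Str.startswith (PySem.Str.strip l) "polyline" with
      | true =>
          rw [List.foldl_cons, List.foldl_cons, bstep_start _ _ _ _ _ _ _ hp,
              bstep_start _ _ _ _ _ _ _ hp]
      | false =>
          rw [List.foldl_cons, List.foldl_cons, bstep_pass _ _ _ _ _ _ _ hp,
              bstep_pass _ _ _ _ _ _ _ hp]
          exact ih _ _ _ _ _ _ _ _ _ _ _

-- running B through one block: it flushes exactly A's block when it is not empty
theorem block_run : ∀ (xs : List String) (d : Int) (res out : List String) (ph pd : Int) (bad : Bool),
    bfinish (xs.foldl bstep ⟨res, true, out, d, ph, pd, bad⟩)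
      = contB (if emptyPts ((takeBlock xs d).1.foldl pstep (ph, pd, bad)).1
                          ((takeBlock xs d).1.foldl pstep (ph, pd, bad)).2.2
               then res else res ++ out ++ (takeBlock xs d).1)
              (takeBlock xs d).2 := by
  intro xs
  induction xs with
  | nil =>
      intro d res out ph pd bad
      simp only [takeBlock, List.foldl_nil, contB, bfinish, List.append_nil]
      by_cases h : emptyPts ph bad = true <;> simp [h]
  | cons l ls ih =>
      intro d res out ph pd bad
      rw [List.foldl_cons, bstep_inblock]
      by_cases hd : d + (PySem.Str.count l "{" : Int) - (PySem.Str.count l "}" : Int) ≤ 0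
      · have htb : takeBlock (l :: ls) d = ([l], ls) := by
          simp only [takeBlock]; rw [if_pos hd]
        rw [if_pos hd, htb]
        show bfinish _ = bfinish _
        rw [List.foldl_cons, List.foldl_nil]
        by_cases he : emptyPts (pstep (ph, pd, bad) l).1 (pstep (ph, pd, bad) l).2.2 = true
        · rw [if_pos he, if_pos he]
          exact bfold_junk _ _ _ _ _ _ _ _ _ _ _ _
        · rw [if_neg he, if_neg he, List.append_assoc]
          exact bfold_junk _ _ _ _ _ _ _ _ _ _ _ _
      · have htb : takeBlock (l :: ls) d =
            (l :: (takeBlock ls (d + (PySem.Str.count l "{" : Int) - (PySem.Str.count l "}" : Int))).1,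
             (takeBlock ls (d + (PySem.Str.count l "{" : Int) - (PySem.Str.count l "}" : Int))).2) := by
          simp only [takeBlock]; rw [if_neg hd]
        rw [if_neg hd, htb, ih]
        simp [List.append_assoc]

theorem contB_eq : ∀ (n : Nat) (xs : List String) (res : List String), xs.length ≤ n →
    contB res xs = res ++ strip_empty_polyline_blocks xs := by
  intro n
  induction n with
  | zero =>
      intro xs res h
      have : xs = [] := by cases xs <;> simp_all
      subst this
      simp [contB, bfinish, strip_empty_polyline_blocks]
  | succ n ih =>
      intro xs res h
      cases xs with
      | nil => simp [contB, bfinish, strip_empty_polyline_blocks]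
      | cons l ls =>
          cases hp : PySem.Str.startswith (PySem.Str.strip l) "polyline" with
          | true =>
              have h1 : contB res (l :: ls)
                  = bfinish ((l :: ls).foldl bstep ⟨res, true, [], 0, 0, 0, false⟩) := by
                show bfinish _ = _
                rw [List.foldl_cons, List.foldl_cons, bstep_start _ _ _ _ _ _ _ hp]
              rw [h1, block_run]
              have hres : (takeBlock (l :: ls) 0).2.length ≤ n := by
                have h2 := takeBlock_rest_lt l ls 0
                simp only [List.length_cons] at h2 h
                omega
              rw [ih _ _ hres]
              have hA : strip_empty_polyline_blocks (l :: ls)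
                  = if isEmptyPolyline (takeBlock (l :: ls) 0).1 false false 0
                    then strip_empty_polyline_blocks (takeBlock (l :: ls) 0).2
                    else (takeBlock (l :: ls) 0).1 ++ strip_empty_polyline_blocks (takeBlock (l :: ls) 0).2 := by
                rw [strip_empty_polyline_blocks]
                rw [if_pos hp]
              rw [hA, (isEmpty_eq (takeBlock (l :: ls) 0).1 0).1]
              by_cases he : emptyPts ((takeBlock (l :: ls) 0).1.foldl pstep (0, 0, false)).1
                  ((takeBlock (l :: ls) 0).1.foldl pstep (0, 0, false)).2.2 = true
              · rw [if_pos he, if_pos he]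
              · rw [if_neg he, if_neg he]
                simp [List.append_assoc]
          | false =>
              have h1 : contB res (l :: ls) = contB (res ++ [l]) ls := by
                show bfinish _ = bfinish _
                rw [List.foldl_cons, bstep_pass _ _ _ _ _ _ _ hp]
              rw [h1, ih ls (res ++ [l]) (by simpa using h)]
              have hA : strip_empty_polyline_blocks (l :: ls) = l :: strip_empty_polyline_blocks ls := by
                rw [strip_empty_polyline_blocks]
                rw [if_neg (by simpa using hp)]
              rw [hA]
              simp

-- ===== VERDICT (by name: the statement is the Claim_ definition above) =====
theorem strip_empty_polyline_blocks_spec : Claim_equal_strip_empty_polyline_blocks := by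
  intro lines _
  show strip_empty_polyline_blocks lines = strip_empty_polyline_blocks_alt lines
  have h := contB_eq lines.length lines [] le_rfl
  simpa [contB, strip_empty_polyline_blocks_alt] using h.symm
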